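-- pv_equiv track=rewrite | github.com/Oneflow-Inc/oneflow | oneflow/python/test/ops/test_maxpool2d.py | coordinate2index
-- ===== SOURCE A (Python) =====
-- def coordinate2index(coordinate, tensor_shape):
--     if len(coordinate) != len(tensor_shape):
--         raise "wrong coordinate or shape"
--     idx = 0
--     for i, coor in enumerate(coordinate):
--         size_at_axis = coor
--         for j in range(i + 1, len(tensor_shape)):
--             size_at_axis *= tensor_shape[j]
--
--         idx += size_at_axis
--     return idx
-- ===== SOURCE B (Python) =====
-- def coordinate2index(coordinate, tensor_shape):
--     if len(coordinate) != len(tensor_shape):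
--         raise ValueError("wrong coordinate or shape")
--     idx = 0
--     stride = 1
--     for coor, size in zip(reversed(coordinate), reversed(tensor_shape)):
--         idx += coor * stride
--         stride *= size
--     return idx
-- ===== Notes on version B (the rewrite author's own statement) =====
-- stated objective: faster
-- what changed: Replaced the nested loop (recomputing the suffix product of the shape for every axis) by a single backward pass that maintains a running stride, accumulating coor*stride per axis.
import Mathlib
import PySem

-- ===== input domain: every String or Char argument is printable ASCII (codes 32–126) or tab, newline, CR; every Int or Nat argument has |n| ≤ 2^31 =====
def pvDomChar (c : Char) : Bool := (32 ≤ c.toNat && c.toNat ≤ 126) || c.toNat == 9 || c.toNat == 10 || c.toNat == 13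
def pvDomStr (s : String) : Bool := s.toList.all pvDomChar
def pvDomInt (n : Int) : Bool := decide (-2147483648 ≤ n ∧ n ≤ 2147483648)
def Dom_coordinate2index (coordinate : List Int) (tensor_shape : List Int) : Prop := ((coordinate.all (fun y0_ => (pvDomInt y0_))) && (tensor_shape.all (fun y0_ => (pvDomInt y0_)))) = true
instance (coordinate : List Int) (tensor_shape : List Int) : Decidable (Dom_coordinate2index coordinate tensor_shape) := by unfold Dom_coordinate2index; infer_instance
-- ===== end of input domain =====

-- B replaces A's nested loop (suffix product recomputed per axis) by one backward pass with a running stride: O(n) instead of O(n^2).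


-- ===== PORT A =====
-- Python raises on unequal lengths (excluded by Pre_); the port returns 0 there.
def coordinate2index (coordinate : List Int) (tensor_shape : List Int) : Int :=
  if coordinate.length ≠ tensor_shape.length then 0
  else
    (PySem.List.enumerate coordinate 0).foldl
      (fun idx p =>
        idx + (PySem.List.pyRange (p.1 + 1) (tensor_shape.length : Int) 1).foldl
          (fun s j => s * PySem.List.pyGetD tensor_shape j 0) p.2)
      0

-- ===== PORT B =====
-- Python raises on unequal lengths (excluded by Pre_); the port returns 0 there.
def coordinate2index_alt (coordinate : List Int) (tensor_shape : List Int) : Int :=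
  if coordinate.length ≠ tensor_shape.length then 0
  else
    ((coordinate.reverse.zip tensor_shape.reverse).foldl
      (fun p cs => (p.1 + cs.1 * p.2, p.2 * cs.2)) ((0 : Int), (1 : Int))).1

-- ===== PRECONDITION & SPEC =====
-- Pre_ excludes exactly the inputs on which Python A raises: unequal lengths.
def Pre_coordinate2index (coordinate : List Int) (tensor_shape : List Int) : Prop :=
  coordinate.length = tensor_shape.length
instance (coordinate : List Int) (tensor_shape : List Int) : Decidable (Pre_coordinate2index coordinate tensor_shape) := by unfold Pre_coordinate2index; infer_instance
def pvWitness_coordinate2index : List Int × List Int := ([1, 2], [3, 4])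

def Spec_coordinate2index (coordinate : List Int) (tensor_shape : List Int) (out : Int) : Prop := out = coordinate2index_alt coordinate tensor_shape
instance (coordinate : List Int) (tensor_shape : List Int) (out : Int) : Decidable (Spec_coordinate2index coordinate tensor_shape out) := by unfold Spec_coordinate2index; infer_instance

-- ===== CLAIM (what is proved, stated in full; the proofs are below) =====
def Claim_equal_coordinate2index : Prop := ∀ (coordinate : List Int) (tensor_shape : List Int), Dom_coordinate2index coordinate tensor_shape → Pre_coordinate2index coordinate tensor_shape → Spec_coordinate2index coordinate tensor_shape (coordinate2index coordinate tensor_shape)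

-- ===== LEMMAS AND PROOFS =====

-- reference value: row-major index, structural on both lists
def pvRef : List Int → List Int → Int
  | c :: cs, _ :: ts => c * ts.prod + pvRef cs ts
  | _, _ => 0

-- foldl of (·*·) starting at a is a * product
theorem pv_foldl_mul (l : List Int) (a : Int) : l.foldl (· * ·) a = a * l.prod := by
  induction l generalizing a with
  | nil => simp
  | cons x xs ih => simp [List.foldl_cons, ih, List.prod_cons]; ring

-- A's outer fold, generalized over the enumerate start index
theorem pvA_fold (c ts : List Int) (k : Nat) (init : Int) (h : k + c.length ≤ ts.length) :
    (PySem.List.enumerate c (k : Int)).foldl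
      (fun idx p =>
        idx + (PySem.List.pyRange (p.1 + 1) (ts.length : Int) 1).foldl
          (fun s j => s * PySem.List.pyGetD ts j 0) p.2)
      init
    = init + pvRef c (ts.drop k) := by
  induction c generalizing k init with
  | nil =>
    simp [PySem.List.enumerate, pvRef]
  | cons x cs ih =>
    have hk : k < ts.length := by simp at h; omega
    rw [PySem.List.enumerate_cons]
    simp only [List.foldl_cons]
    have h1 : (0:Int) ≤ (k:Int) + 1 := by positivity
    rw [PySem.List.foldl_pyRange_pyGetD' ts 0 (· * ·) x h1, pv_foldl_mul]
    have h2 : ((k : Int) + 1).toNat = k + 1 := by omega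
    rw [h2]
    have h3 : k + 1 + cs.length ≤ ts.length := by simp at h; omega
    have hih := ih (k + 1) (init + x * (ts.drop (k + 1)).prod) h3
    push_cast at hih
    rw [hih, List.drop_eq_getElem_cons hk]
    simp only [pvRef]
    ring

theorem pvB_foldr (c ts : List Int) (h : c.length = ts.length) :
    (c.zip ts).foldr (fun cs p => (p.1 + cs.1 * p.2, p.2 * cs.2)) ((0 : Int), (1 : Int))
      = (pvRef c ts, ts.prod) := by
  induction c generalizing ts with
  | nil => cases ts with
    | nil => simp [pvRef]
    | cons t ts => simp at h
  | cons x cs ih =>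
    cases ts with
    | nil => simp at h
    | cons t ts =>
      simp only [List.length_cons, Nat.add_right_cancel_iff] at h
      simp [List.zip_cons_cons, List.foldr_cons, ih ts h, pvRef, List.prod_cons]
      constructor <;> ring

theorem pv_zip_reverse (c ts : List Int) (h : c.length = ts.length) :
    c.reverse.zip ts.reverse = (c.zip ts).reverse := by
  induction c generalizing ts with
  | nil => cases ts with
    | nil => simp
    | cons t ts => simp at h
  | cons x cs ih =>
    cases ts with
    | nil => simp at h
    | cons t ts =>
      simp only [List.length_cons, Nat.add_right_cancel_iff] at h
      rw [List.reverse_cons, List.reverse_cons, List.zip_append (by simp [h]), ih ts h]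
      simp

-- ===== VERDICT (by name: the statement is the Claim_ definition above) =====
theorem coordinate2index_spec : Claim_equal_coordinate2index := by
  intro c ts _ hpre
  unfold Spec_coordinate2index coordinate2index coordinate2index_alt
  rw [if_neg (by simpa using hpre), if_neg (by simpa using hpre)]
  rw [pv_zip_reverse c ts hpre, List.foldl_reverse, pvB_foldr c ts hpre]
  have := pvA_fold c ts 0 0 (by unfold Pre_coordinate2index at hpre; omega)
  simp only [Nat.cast_zero, List.drop_zero] at this
  rw [this]
  ring
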